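-- pv_equiv track=rewrite | github.com/Ruscondil/MeshCentral-scripts | parseoutput-matplotlib.py | extract_row_data
-- ===== SOURCE A (Python) =====
-- def extract_row_data(data, workload, columns):
--     rows = []
--     for fs, devices in data.items():
--         row = [fs]
--         for col in columns[1:]:  # Skip File System
--             if len(col.split()) > 3:
--                 col = col.split()
--                 storage, metric, stat = col[0],col[1]+' '+col[2],col[3]
--             else:
--                 storage, metric, stat = col.split(" ", 2)
--             if workload == 'database':
--                 if "Latency" in metric:
--                     metric_key = f"{metric} (ms)"
--                 else:
--                     metric_key = f"{metric} (MiB/s)" if "Bandwidth" in metric else metric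
--             elif workload == 'archive':
--                 if metric == "Latency":
--                     metric_key = "Latency WRITE (ms)"
--                 else:
--                     metric_key = f"{metric} WRITE (MiB/s)" if metric == "Bandwidth" else f"{metric} WRITE"
--             else:
--                 if metric == "Latency":
--                     metric_key = "Latency READ (ms)"
--                 else:
--                     metric_key = f"{metric} READ (MiB/s)" if metric == "Bandwidth" else f"{metric} READ"
--             # Extract value
--             value = "N/A"
--             for device_type, workloads in devices.items():
--                 if device_type.lower() == storage.lower() and workload in workloads:
--                     value = workloads[workload].get(metric_key, {}).get(stat.lower(), "N/A")
--                     break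
--             row.append(value)
--         rows.append(row)
--     return rows
-- ===== SOURCE B (Python) =====
-- def extract_row_data(data, workload, columns):
--     if not data:
--         return []
--     # Parse every column once into (storage_key, metric_key, stat_key).
--     specs = []
--     for col in columns[1:]:
--         parts = col.split()
--         if len(parts) > 3:
--             storage, metric, stat = parts[0], parts[1] + ' ' + parts[2], parts[3]
--         else:
--             storage, metric, stat = col.split(" ", 2)
--         if workload == 'database':
--             if "Latency" in metric:
--                 metric_key = metric + " (ms)"
--             elif "Bandwidth" in metric:
--                 metric_key = metric + " (MiB/s)"
--             else:
--                 metric_key = metric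
--         else:
--             suffix = 'WRITE' if workload == 'archive' else 'READ'
--             if metric == "Latency":
--                 metric_key = "Latency " + suffix + " (ms)"
--             elif metric == "Bandwidth":
--                 metric_key = metric + " " + suffix + " (MiB/s)"
--             else:
--                 metric_key = metric + " " + suffix
--         specs.append((storage.lower(), metric_key, stat.lower()))
--     rows = []
--     for fs, devices in data.items():
--         # Index the devices once by lowercase name (first device carrying the workload wins).
--         by_name = {}
--         for device_type, workloads in devices.items():
--             k = device_type.lower()
--             if k not in by_name and workload in workloads:
--                 by_name[k] = workloads[workload]
--         row = [fs]
--         for storage_key, metric_key, stat_key in specs: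
--             metrics = by_name.get(storage_key)
--             row.append("N/A" if metrics is None else metrics.get(metric_key, {}).get(stat_key, "N/A"))
--         rows.append(row)
--     return rows
-- ===== Notes on version B (the rewrite author's own statement) =====
-- stated objective: faster
-- what changed: B short-circuits empty data, parses every column into a (storage,metric_key,stat) spec exactly once up front, and replaces A's per-cell linear scan over devices by one lowercase-keyed dict per filesystem (first device carrying the workload wins), so per-row work is hoisted out of the loops.
import Mathlib
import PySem

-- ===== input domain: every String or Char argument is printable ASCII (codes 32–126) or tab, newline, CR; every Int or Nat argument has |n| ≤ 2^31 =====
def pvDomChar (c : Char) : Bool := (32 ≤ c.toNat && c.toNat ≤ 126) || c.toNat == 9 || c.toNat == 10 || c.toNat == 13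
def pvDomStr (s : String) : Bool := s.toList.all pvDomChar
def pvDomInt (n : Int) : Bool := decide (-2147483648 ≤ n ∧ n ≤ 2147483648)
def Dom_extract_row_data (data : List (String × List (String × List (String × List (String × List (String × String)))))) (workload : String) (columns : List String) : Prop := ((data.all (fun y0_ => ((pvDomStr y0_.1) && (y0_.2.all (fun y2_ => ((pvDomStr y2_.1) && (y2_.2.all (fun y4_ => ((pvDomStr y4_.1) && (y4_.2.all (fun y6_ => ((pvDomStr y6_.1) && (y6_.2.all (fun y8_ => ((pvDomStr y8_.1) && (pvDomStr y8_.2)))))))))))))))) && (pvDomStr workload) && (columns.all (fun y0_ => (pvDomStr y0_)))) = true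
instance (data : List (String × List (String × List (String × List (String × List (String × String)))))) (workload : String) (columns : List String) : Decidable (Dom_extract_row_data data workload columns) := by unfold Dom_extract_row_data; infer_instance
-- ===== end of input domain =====

-- B parses each column once and indexes each filesystem's devices once by lowercase name,
-- instead of A's re-parsing of every column for every filesystem and linear device scan per cell (objective: faster, constant-factor).

abbrev PvStats := List (String × String)
abbrev PvMetrics := List (String × PvStats)
abbrev PvWorkloads := List (String × PvMetrics)
abbrev PvDevices := List (String × PvWorkloads)

-- ===== PORT A =====
-- col.split() / col.split(" ", 2) and the 3-way unpack; on an unparseable column Python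
-- raises ValueError (excluded by Pre_), the port returns ("","","") there.
def pvSplitColA (col : String) : String × String × String :=
  let toks := PySem.Str.split₀ col
  if toks.length > 3 then
    (toks.getD 0 "", toks.getD 1 "" ++ " " ++ toks.getD 2 "", toks.getD 3 "")
  else
    match (PySem.Str.splitMax? col " " 2).getD [] with
    | [a, b, c] => (a, b, c)
    | _ => ("", "", "")

def pvMetricKeyA (workload metric : String) : String :=
  if workload == "database" then
    if PySem.Str.isIn "Latency" metric then metric ++ " (ms)"
    else if PySem.Str.isIn "Bandwidth" metric then metric ++ " (MiB/s)"
    else metric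
  else if workload == "archive" then
    if metric == "Latency" then "Latency WRITE (ms)"
    else if metric == "Bandwidth" then metric ++ " WRITE (MiB/s)"
    else metric ++ " WRITE"
  else
    if metric == "Latency" then "Latency READ (ms)"
    else if metric == "Bandwidth" then metric ++ " READ (MiB/s)"
    else metric ++ " READ"

-- A's inner 'for device_type, workloads in devices.items(): … break' loop
-- (dict lookups are first-match List.lookup on the association lists).
def pvFindValueA (workload storage metric_key stat : String) : PvDevices → String
  | [] => "N/A"
  | (dt, wls) :: rest =>
    if PySem.Str.lower dt == PySem.Str.lower storage && (List.lookup workload wls).isSome then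
      (List.lookup (PySem.Str.lower stat)
        ((List.lookup metric_key ((List.lookup workload wls).getD [])).getD [])).getD "N/A"
    else pvFindValueA workload storage metric_key stat rest

def extract_row_data (data : List (String × List (String × List (String × List (String × List (String × String)))))) (workload : String) (columns : List String) : List (List String) :=
  data.foldl (fun rows fsdev =>
    let row := (PySem.List.slice columns (some 1) none).foldl (fun row col =>
      let smt := pvSplitColA col
      let metric_key := pvMetricKeyA workload smt.2.1
      let value := pvFindValueA workload smt.1 metric_key smt.2.2 fsdev.2
      row ++ [value]) [fsdev.1]
    rows ++ [row]) []

-- ===== PORT B =====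
-- B's copy of the column-split logic (Source B parses each column once, up front).
def pvSplitColB (col : String) : String × String × String :=
  let toks := PySem.Str.split₀ col
  if toks.length > 3 then
    (toks.getD 0 "", toks.getD 1 "" ++ " " ++ toks.getD 2 "", toks.getD 3 "")
  else
    match (PySem.Str.splitMax? col " " 2).getD [] with
    | [a, b, c] => (a, b, c)
    | _ => ("", "", "")

def pvMetricKeyB (workload metric : String) : String :=
  if workload == "database" then
    if PySem.Str.isIn "Latency" metric then metric ++ " (ms)"
    else if PySem.Str.isIn "Bandwidth" metric then metric ++ " (MiB/s)"
    else metric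
  else
    let suffix := if workload == "archive" then "WRITE" else "READ"
    if metric == "Latency" then "Latency " ++ (suffix ++ " (ms)")
    else if metric == "Bandwidth" then metric ++ (" " ++ (suffix ++ " (MiB/s)"))
    else metric ++ (" " ++ suffix)

-- one precomputed column spec: (storage key, metric key, stat key)
def pvSpecB (workload col : String) : String × String × String :=
  let smt := pvSplitColB col
  (PySem.Str.lower smt.1, pvMetricKeyB workload smt.2.1, PySem.Str.lower smt.2.2)

-- Source B's by_name dict: first device (in order) whose lowercase name is new and which carries the workload.
def pvByNameB (workload : String) (devices : PvDevices) : PySem.Dict String PvMetrics :=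
  devices.foldl (fun d dw =>
    let k := PySem.Str.lower dw.1
    if !(d.contains k) && (List.lookup workload dw.2).isSome then
      d.insert k ((List.lookup workload dw.2).getD [])
    else d) PySem.Dict.empty

def pvCellB (byName : PySem.Dict String PvMetrics) (spec : String × String × String) : String :=
  match byName.get? spec.1 with
  | none => "N/A"
  | some metrics => (List.lookup spec.2.2 ((List.lookup spec.2.1 metrics).getD [])).getD "N/A"

def extract_row_data_alt (data : List (String × List (String × List (String × List (String × List (String × String)))))) (workload : String) (columns : List String) : List (List String) :=
  if data.isEmpty then []
  else
    let specs := (columns.drop 1).map (pvSpecB workload)  -- columns[1:] (nonnegative start: exact)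
    data.map (fun fsdev => fsdev.1 :: specs.map (pvCellB (pvByNameB workload fsdev.2)))

-- ===== PRECONDITION & SPEC =====
-- Pre_ excludes exactly the inputs where Python A raises ValueError: nonempty data together with a
-- column (after the first) that neither has > 3 whitespace tokens nor splits into 3 parts on " ".
def Pre_extract_row_data (data : List (String × List (String × List (String × List (String × List (String × String)))))) (workload : String) (columns : List String) : Prop :=
  data = [] ∨ ∀ col ∈ columns.drop 1,
    (PySem.Str.split₀ col).length > 3 ∨ ((PySem.Str.splitMax? col " " 2).getD []).length = 3
instance (data : List (String × List (String × List (String × List (String × List (String × String)))))) (workload : String) (columns : List String) : Decidable (Pre_extract_row_data data workload columns) := by unfold Pre_extract_row_data; infer_instance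

def pvWitness_extract_row_data : (List (String × List (String × List (String × List (String × List (String × String)))))) × String × List String :=
  ([("fs1", [("hdd", [("database", [("Latency (ms)", [("min", "1")])])])])],
   "database", ["File System", "hdd Latency min"])

def Spec_extract_row_data (data : List (String × List (String × List (String × List (String × List (String × String)))))) (workload : String) (columns : List String) (out : List (List String)) : Prop := out = extract_row_data_alt data workload columns
instance (data : List (String × List (String × List (String × List (String × List (String × String)))))) (workload : String) (columns : List String) (out : List (List String)) : Decidable (Spec_extract_row_data data workload columns out) := by unfold Spec_extract_row_data; infer_instance

-- ===== CLAIM (what is proved, stated in full; the proofs are below) =====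
def Claim_equal_extract_row_data : Prop := ∀ (data : List (String × List (String × List (String × List (String × List (String × String)))))) (workload : String) (columns : List String), Dom_extract_row_data data workload columns → Pre_extract_row_data data workload columns → Spec_extract_row_data data workload columns (extract_row_data data workload columns)

-- ===== LEMMAS AND PROOFS =====

theorem pvSplitColB_eq : pvSplitColB = pvSplitColA := rfl

theorem pvMetricKeyB_eq (workload metric : String) :
    pvMetricKeyB workload metric = pvMetricKeyA workload metric := by
  unfold pvMetricKeyA pvMetricKeyB
  by_cases hd : workload == "database" <;> by_cases ha : workload == "archive" <;>
    simp only [hd, ha, if_true, if_false, Bool.false_eq_true] <;>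
    by_cases hl : metric == "Latency" <;> by_cases hb : metric == "Bandwidth" <;>
    simp_all

-- A's device scan, as a first-match search keyed by the lowercase storage name.
def pvScan (workload k : String) : PvDevices → Option PvMetrics
  | [] => none
  | (dt, wls) :: rest =>
    if PySem.Str.lower dt == k && (List.lookup workload wls).isSome then
      some ((List.lookup workload wls).getD [])
    else pvScan workload k rest

theorem pvFindValueA_eq_scan (workload storage metric_key stat : String) (devices : PvDevices) :
    pvFindValueA workload storage metric_key stat devices =
      match pvScan workload (PySem.Str.lower storage) devices with
      | none => "N/A"
      | some metrics =>
          (List.lookup (PySem.Str.lower stat) ((List.lookup metric_key metrics).getD [])).getD "N/A" := by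
  induction devices with
  | nil => rfl
  | cons dw rest ih =>
    obtain ⟨dt, wls⟩ := dw
    by_cases h : PySem.Str.lower dt == PySem.Str.lower storage && (List.lookup workload wls).isSome <;>
      simp [pvFindValueA, pvScan, h, ih]

-- proof-side view of Source B's dict-building fold, with an arbitrary starting dict
def pvBuild (workload : String) (devices : PvDevices) (d : PySem.Dict String PvMetrics) :
    PySem.Dict String PvMetrics :=
  devices.foldl (fun d dw =>
    if !(d.contains (PySem.Str.lower dw.1)) && (List.lookup workload dw.2).isSome then
      d.insert (PySem.Str.lower dw.1) ((List.lookup workload dw.2).getD [])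
    else d) d

theorem pvByNameB_eq_pvBuild (workload : String) (devices : PvDevices) :
    pvByNameB workload devices = pvBuild workload devices PySem.Dict.empty := rfl

theorem pvBuild_get? (workload k : String) (devices : PvDevices)
    (d : PySem.Dict String PvMetrics) :
    (pvBuild workload devices d).get? k = (d.get? k).or (pvScan workload k devices) := by
  unfold pvBuild
  induction devices generalizing d with
  | nil => simp [pvScan]
  | cons dw rest ih =>
    obtain ⟨dt, wls⟩ := dw
    simp only [List.foldl_cons, pvScan]
    by_cases hk : PySem.Str.lower dt = k
    · by_cases hw : (List.lookup workload wls).isSome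
      · by_cases hc : d.contains (PySem.Str.lower dt)
        · -- key already present: no insert, scan's hit is shadowed by d.get? k
          simp only [hc, hw, Bool.not_true, Bool.false_and, ih]
          have hc' : (d.get? k).isSome = true := by
            rw [← hk]; rw [PySem.Dict.contains_eq_isSome_get?] at hc; exact hc
          obtain ⟨v, hv⟩ := Option.isSome_iff_exists.mp hc'
          rw [hv]
          simp
          exact Or.inl hv
        · simp only [hc, hw, Bool.not_false, Bool.true_and, if_true, ih]
          rw [hk, PySem.Dict.get?_insert_self]
          have hn : d.get? k = none := by
            rw [PySem.Dict.get?_eq_none_iff_contains, ← hk]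
            exact Bool.of_not_eq_true hc
          simp [hn]
      · simp only [Bool.eq_false_iff.mpr hw, Bool.and_false, ih]
        simp
    · have hbeq : (PySem.Str.lower dt == k) = false := beq_eq_false_iff_ne.mpr hk
      by_cases hc : !(d.contains (PySem.Str.lower dt)) && (List.lookup workload wls).isSome
      · simp only [hc, if_true, ih, PySem.Dict.get?_insert_of_ne d _ (Ne.symm hk)]
        simp [hbeq]
      · simp only [hc, ih]
        simp [hbeq]

theorem pvCellB_eq (workload : String) (devices : PvDevices) (col : String) :
    pvCellB (pvByNameB workload devices) (pvSpecB workload col) =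
      pvFindValueA workload (pvSplitColA col).1
        (pvMetricKeyA workload (pvSplitColA col).2.1) (pvSplitColA col).2.2 devices := by
  rw [pvFindValueA_eq_scan]
  simp only [pvCellB, pvSpecB, pvSplitColB_eq, pvMetricKeyB_eq]
  rw [pvByNameB_eq_pvBuild, pvBuild_get?, PySem.Dict.get?_empty, Option.none_or]

theorem row_eq (workload : String) (columns : List String) (fs : String) (devices : PvDevices) :
    (PySem.List.slice columns (some 1) none).foldl (fun row col =>
        let smt := pvSplitColA col
        let metric_key := pvMetricKeyA workload smt.2.1
        let value := pvFindValueA workload smt.1 metric_key smt.2.2 devices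
        row ++ [value]) [fs]
      = fs :: ((columns.drop 1).map (pvSpecB workload)).map (pvCellB (pvByNameB workload devices)) := by
  rw [PySem.List.slice_from columns (by norm_num : (0:Int) ≤ 1)]
  rw [List.map_map]
  have := PySem.List.foldl_append_singleton_eq_map
    (fun col => pvFindValueA workload (pvSplitColA col).1
      (pvMetricKeyA workload (pvSplitColA col).2.1) (pvSplitColA col).2.2 devices)
    (columns.drop (1:Int).toNat) [fs]
  rw [this]
  simp only [List.singleton_append, Int.toNat_one]
  congr 1
  apply List.map_congr_left
  intro col _
  simp only [Function.comp_apply, pvCellB_eq]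

-- ===== VERDICT (by name: the statement is the Claim_ definition above) =====
theorem extract_row_data_spec : Claim_equal_extract_row_data := by
  intro data workload columns _ _
  unfold Spec_extract_row_data extract_row_data extract_row_data_alt
  cases data with
  | nil => rfl
  | cons fd rest =>
    simp only [List.isEmpty_cons, Bool.false_eq_true, if_false]
    rw [PySem.List.foldl_append_singleton_eq_map
      (fun fsdev => (PySem.List.slice columns (some 1) none).foldl (fun row col =>
        let smt := pvSplitColA col
        let metric_key := pvMetricKeyA workload smt.2.1
        let value := pvFindValueA workload smt.1 metric_key smt.2.2 fsdev.2
        row ++ [value]) [fsdev.1]) (fd :: rest) []]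
    simp only [List.nil_append]
    apply List.map_congr_left
    intro fsdev _
    exact row_eq workload columns fsdev.1 fsdev.2
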